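-- pv_equiv track=rewrite | github.com/cugzzl/Simulation_gazebo | Simulation/mainControl/Simulation/filter_utils.py | filter_current_model
-- ===== SOURCE A (Python) =====
-- import copy
--
-- def filter_current_model(all_kind_sudden, static_model, current_step, experiment_id):
--     """
--     根据突发状况时间，得到当前step中应当存在的模型
--     :param experiment_id: 试验id
--     :param all_kind_sudden: 突发的目标事件
--     :param static_model: 模型静态参数
--     :param current_step: 当前步长
--     :return: 当前step中应该出现的模型的静态参数（原始目标、威胁、无人机）
--     """
--     not_exist = set()
--     for sudden in all_kind_sudden:
--         # 判断是否应该在当前时间出现，添加进集合中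
--         if sudden[1] > current_step or sudden[2] < current_step:
--             sudden_model_id = sudden[0]
--             not_exist.add(sudden_model_id)
--     current_static_model = []
--     current_model_id = set()
--     for model_id in static_model:
--         model = static_model.get(model_id)
--         if not_exist.__contains__(model_id):
--             continue
--         tmp = copy.deepcopy(model)
--         tmp.append(experiment_id)
--         tmp.append(current_step)
--         current_static_model.append(tmp)
--         current_model_id.add(model_id)
--
--     return current_static_model, current_model_id
-- ===== SOURCE B (Python) =====
-- def filter_current_model(all_kind_sudden, static_model, current_step, experiment_id):
--     # Single pass over the dict keys; exclusion decided inline by scanning the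
--     # sudden events, so no precomputed not_exist set is needed.
--     def active(mid):
--         return all(not (s[0] == mid and (s[1] > current_step or s[2] < current_step))
--                    for s in all_kind_sudden)
--     kept = [mid for mid in static_model if active(mid)]
--     current_static_model = [list(static_model[mid]) + [experiment_id, current_step]
--                             for mid in kept]
--     return current_static_model, set(kept)
-- ===== Notes on version B (the rewrite author's own statement) =====
-- stated objective: alternative
-- what changed: B drops A's precomputed not_exist set and its separate accumulator loop: it decides exclusion inline by rescanning all_kind_sudden per key and builds the two results with comprehensions (filter over keys, then map; set built once at the end).
import Mathlib
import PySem

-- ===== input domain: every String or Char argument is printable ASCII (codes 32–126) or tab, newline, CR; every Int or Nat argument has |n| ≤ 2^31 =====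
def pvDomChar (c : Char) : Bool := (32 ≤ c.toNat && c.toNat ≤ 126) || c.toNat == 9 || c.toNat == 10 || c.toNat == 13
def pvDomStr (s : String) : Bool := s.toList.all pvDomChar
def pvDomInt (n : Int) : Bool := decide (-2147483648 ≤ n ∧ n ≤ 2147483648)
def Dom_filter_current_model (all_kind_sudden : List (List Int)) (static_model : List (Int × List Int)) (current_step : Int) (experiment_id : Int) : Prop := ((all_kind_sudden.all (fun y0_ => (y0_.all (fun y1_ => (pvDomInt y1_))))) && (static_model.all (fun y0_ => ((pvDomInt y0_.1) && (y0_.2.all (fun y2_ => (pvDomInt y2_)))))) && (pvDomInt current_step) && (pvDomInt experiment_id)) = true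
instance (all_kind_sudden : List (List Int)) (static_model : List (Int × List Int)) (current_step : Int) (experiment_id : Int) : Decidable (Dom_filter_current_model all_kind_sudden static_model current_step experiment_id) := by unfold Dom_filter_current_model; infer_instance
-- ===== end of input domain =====

-- B replaces A's precomputed not_exist set and explicit accumulator loop by an inline
-- per-key rescan of all_kind_sudden with filter/map comprehensions (alternative
-- decomposition, same return value).


-- ===== PORT A =====
-- dict lookup on the association-list encoding: first match (shared helper)
def pyDictGet (sm : List (Int × List Int)) (k : Int) : Option (List Int) :=
  (sm.find? (fun kv => kv.1 == k)).map Prod.snd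

def filter_current_model (all_kind_sudden : List (List Int)) (static_model : List (Int × List Int)) (current_step : Int) (experiment_id : Int) : List (List Int) × List Int :=
  -- not_exist = set(); for sudden in all_kind_sudden: if sudden[1] > current_step or sudden[2] < current_step: not_exist.add(sudden[0])
  let not_exist : PySem.Set Int := all_kind_sudden.foldl (fun ne sudden =>
    if PySem.List.pyGetD sudden 1 0 > current_step ∨ PySem.List.pyGetD sudden 2 0 < current_step
    then PySem.Set.add ne (PySem.List.pyGetD sudden 0 0) else ne) PySem.Set.empty
  -- for model_id in static_model: model = static_model.get(model_id); skip if model_id in not_exist; else append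
  let st := static_model.foldl (fun (acc : List (List Int) × PySem.Set Int) kv =>
    let model := (pyDictGet static_model kv.1).getD []
    if PySem.Set.contains not_exist kv.1 then acc
    else (acc.1 ++ [model ++ [experiment_id, current_step]], PySem.Set.add acc.2 kv.1))
    ([], PySem.Set.empty)
  (st.1, st.2)

-- ===== PORT B =====
def filter_current_model_alt (all_kind_sudden : List (List Int)) (static_model : List (Int × List Int)) (current_step : Int) (experiment_id : Int) : List (List Int) × List Int :=
  -- kept = [mid for mid in static_model if active(mid)]
  let kept := (static_model.map Prod.fst).filter (fun mid =>
    all_kind_sudden.all (fun s =>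
      !(PySem.List.pyGetD s 0 0 == mid
        && (decide (PySem.List.pyGetD s 1 0 > current_step)
            || decide (PySem.List.pyGetD s 2 0 < current_step)))))
  -- current_static_model = [list(static_model[mid]) + [experiment_id, current_step] for mid in kept]
  (kept.map (fun mid => (pyDictGet static_model mid).getD [] ++ [experiment_id, current_step]),
   PySem.Set.ofList kept)

-- ===== PRECONDITION & SPEC =====
-- Pre_ excludes (a) sudden events too short for A's indexing (Python IndexError: it reads
-- sudden[1], then possibly sudden[2] and sudden[0]) and (b) association lists with duplicate
-- keys, which no Python dict can carry.
def Pre_filter_current_model (all_kind_sudden : List (List Int)) (static_model : List (Int × List Int)) (current_step : Int) (experiment_id : Int) : Prop :=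
  (∀ s ∈ all_kind_sudden, (2 ≤ s.length ∧ PySem.List.pyGetD s 1 0 > current_step) ∨ 3 ≤ s.length)
  ∧ (static_model.map Prod.fst).Nodup
instance (all_kind_sudden : List (List Int)) (static_model : List (Int × List Int)) (current_step : Int) (experiment_id : Int) : Decidable (Pre_filter_current_model all_kind_sudden static_model current_step experiment_id) := by unfold Pre_filter_current_model; infer_instance

def pvWitness_filter_current_model : List (List Int) × (List (Int × List Int)) × Int × Int :=
  ([[1, 0, 5], [2, 3, 3]], [(1, [10]), (2, [20]), (3, [30])], 4, 99)

def Spec_filter_current_model (all_kind_sudden : List (List Int)) (static_model : List (Int × List Int)) (current_step : Int) (experiment_id : Int) (out : List (List Int) × List Int) : Prop := out = filter_current_model_alt all_kind_sudden static_model current_step experiment_id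
instance (all_kind_sudden : List (List Int)) (static_model : List (Int × List Int)) (current_step : Int) (experiment_id : Int) (out : List (List Int) × List Int) : Decidable (Spec_filter_current_model all_kind_sudden static_model current_step experiment_id out) := by unfold Spec_filter_current_model; infer_instance

-- ===== CLAIM (what is proved, stated in full; the proofs are below) =====
def Claim_equal_filter_current_model : Prop := ∀ (all_kind_sudden : List (List Int)) (static_model : List (Int × List Int)) (current_step : Int) (experiment_id : Int), Dom_filter_current_model all_kind_sudden static_model current_step experiment_id → Pre_filter_current_model all_kind_sudden static_model current_step experiment_id → Spec_filter_current_model all_kind_sudden static_model current_step experiment_id (filter_current_model all_kind_sudden static_model current_step experiment_id)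

-- ===== LEMMAS AND PROOFS =====

-- membership in A's not_exist set, as the per-key rescan boolean B uses
theorem notExist_contains (aks : List (List Int)) (cs mid : Int) (ne : PySem.Set Int) :
    PySem.Set.contains (aks.foldl (fun ne sudden =>
      if PySem.List.pyGetD sudden 1 0 > cs ∨ PySem.List.pyGetD sudden 2 0 < cs
      then PySem.Set.add ne (PySem.List.pyGetD sudden 0 0) else ne) ne) mid
    = (PySem.Set.contains ne mid ||
       aks.any (fun s => (PySem.List.pyGetD s 0 0 == mid)
         && (decide (PySem.List.pyGetD s 1 0 > cs) || decide (PySem.List.pyGetD s 2 0 < cs)))) := by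
  induction aks generalizing ne with
  | nil => simp
  | cons s rest ih =>
    simp only [List.foldl_cons, List.any_cons, ih]
    by_cases h : PySem.List.pyGetD s 1 0 > cs ∨ PySem.List.pyGetD s 2 0 < cs
    · simp only [if_pos h]
      have hc : PySem.Set.contains (PySem.Set.add ne (PySem.List.pyGetD s 0 0)) mid
          = (PySem.Set.contains ne mid || (PySem.List.pyGetD s 0 0 == mid)) := by
        rw [Bool.eq_iff_iff]
        simp only [PySem.Set.contains_iff, PySem.Set.mem_add, Bool.or_eq_true, beq_iff_eq]
        constructor
        · rintro (h | h)
          · exact Or.inl h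
          · exact Or.inr h.symm
        · rintro (h | h)
          · exact Or.inl h
          · exact Or.inr h.symm
      have hcond : (decide (PySem.List.pyGetD s 1 0 > cs) || decide (PySem.List.pyGetD s 2 0 < cs)) = true := by
        rcases h with h | h <;> simp [h]
      rw [hc, hcond]
      cases PySem.Set.contains ne mid <;> cases (PySem.List.pyGetD s 0 0 == mid) <;> simp
    · simp only [if_neg h]
      rw [not_or, not_lt, not_lt] at h
      have h1 : decide (PySem.List.pyGetD s 1 0 > cs) = false := by simp [h.1]
      have h2 : decide (PySem.List.pyGetD s 2 0 < cs) = false := by simp [h.2]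
      rw [h1, h2]
      simp

-- A's second loop equals B's filter/map over the remaining keys (q = the skip test)
theorem loop_eq (sm : List (Int × List Int)) (cs eid : Int) (q : Int → Bool)
    (rest : List (Int × List Int)) (acc : List (List Int) × PySem.Set Int) :
    rest.foldl (fun (acc : List (List Int) × PySem.Set Int) kv =>
      if q kv.1 then acc
      else (acc.1 ++ [(pyDictGet sm kv.1).getD [] ++ [eid, cs]], PySem.Set.add acc.2 kv.1)) acc
    = (acc.1 ++ ((rest.map Prod.fst).filter (fun m => !q m)).map
        (fun mid => (pyDictGet sm mid).getD [] ++ [eid, cs]),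
       PySem.Set.update acc.2 ((rest.map Prod.fst).filter (fun m => !q m))) := by
  induction rest generalizing acc with
  | nil => simp [PySem.Set.update]
  | cons kv rest ih =>
    by_cases h : q kv.1 = true
    · simp only [List.foldl_cons, List.map_cons, List.filter_cons, h, if_pos, Bool.not_true,
        Bool.false_eq_true, if_false]
      exact ih acc
    · replace h : q kv.1 = false := by simpa using h
      simp only [List.foldl_cons, List.map_cons, List.filter_cons, h, Bool.false_eq_true,
        if_false, Bool.not_false, if_true, ih, List.map_cons, PySem.Set.update_cons,
        List.append_assoc, List.cons_append, List.nil_append]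

-- ===== VERDICT (by name: the statement is the Claim_ definition above) =====
theorem filter_current_model_spec : Claim_equal_filter_current_model := by
  intro aks sm cs eid _hdom _hpre
  unfold Spec_filter_current_model filter_current_model filter_current_model_alt
  dsimp only
  rw [loop_eq sm cs eid
    (fun k => PySem.Set.contains (aks.foldl (fun ne sudden =>
      if PySem.List.pyGetD sudden 1 0 > cs ∨ PySem.List.pyGetD sudden 2 0 < cs
      then PySem.Set.add ne (PySem.List.pyGetD sudden 0 0) else ne) PySem.Set.empty) k)
    sm ([], PySem.Set.empty)]
  have hfun : (fun k => !(PySem.Set.contains (aks.foldl (fun ne sudden =>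
      if PySem.List.pyGetD sudden 1 0 > cs ∨ PySem.List.pyGetD sudden 2 0 < cs
      then PySem.Set.add ne (PySem.List.pyGetD sudden 0 0) else ne) PySem.Set.empty) k))
      = (fun mid => aks.all (fun s =>
        !(PySem.List.pyGetD s 0 0 == mid
          && (decide (PySem.List.pyGetD s 1 0 > cs)
              || decide (PySem.List.pyGetD s 2 0 < cs))))) := by
    funext mid
    rw [notExist_contains]
    simp [PySem.Set.empty, PySem.Set.contains, List.all_eq_not_any_not]
  rw [hfun]
  simp [PySem.Set.update_nil_left, PySem.Set.empty]
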